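-- pv_equiv track=rewrite | github.com/fentender/sutan-game | src/gui/json_editor.py | _format_with_comments
-- ===== SOURCE A (Python) =====
-- _INDENT = "    "
--
-- def _split_code_comment(line: str) -> tuple[str, str]:
--     """将一行拆分为 (代码部分, 注释部分)，正确处理字符串内的 //"""
--     in_string = False
--     escape = False
--     for i, ch in enumerate(line):
--         if escape:
--             escape = False
--             continue
--         if ch == '\\' and in_string:
--             escape = True
--             continue
--         if ch == '"':
--             in_string = not in_string
--             continue
--         if not in_string and ch == '/' and i + 1 < len(line) and line[i + 1] == '/':
--             return line[:i], line[i:]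
--     return line, ""
--
-- def _count_brackets(code: str) -> tuple[int, int, int]:
--     """统计代码中的开/闭括号数和行首闭括号数（排除字符串内的）
--     返回 (opens, closes, leading_closes)"""
--     in_string = False
--     escape = False
--     opens = 0
--     closes = 0
--     leading_closes = 0
--     found_non_bracket = False
--
--     for ch in code:
--         if escape:
--             escape = False
--             continue
--         if ch == '\\' and in_string:
--             escape = True
--             continue
--         if ch == '"':
--             in_string = not in_string
--             found_non_bracket = True
--             continue
--         if in_string:
--             continue
--         if ch in ('{', '['):
--             opens += 1
--             found_non_bracket = True
--         elif ch in ('}', ']'):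
--             closes += 1
--             if not found_non_bracket:
--                 leading_closes += 1
--         elif not ch.isspace():
--             found_non_bracket = True
--
--     return opens, closes, leading_closes
--
-- def _format_with_comments(text: str) -> str:
--     """基于括号深度的缩进格式化，保留注释"""
--     lines = text.split('\n')
--     result = []
--     indent_level = 0
--
--     for line in lines:
--         stripped = line.strip()
--         if not stripped:
--             result.append("")
--             continue
--
--         code, comment = _split_code_comment(stripped)
--         code = code.rstrip()
--         opens, closes, leading_closes = _count_brackets(code)
--
--         this_indent = max(0, indent_level - leading_closes)
--
--         if code and comment:
--             result.append(_INDENT * this_indent + code + "  " + comment)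
--         elif code:
--             result.append(_INDENT * this_indent + code)
--         else:
--             # 纯注释行
--             result.append(_INDENT * this_indent + comment)
--
--         indent_level += opens - closes
--         indent_level = max(0, indent_level)
--
--     # 去除末尾多余空行
--     while result and result[-1] == "":
--         result.pop()
--
--     return '\n'.join(result) + '\n'
-- ===== SOURCE B (Python) =====
-- _INDENT = "    "
--
-- def _scan_line(stripped):
--     """One fused pass: split off an unescaped // comment outside strings and,
--     while still in code, count opens, closes and leading closes."""
--     in_string = False
--     escape = False
--     opens = closes = leading_closes = 0
--     found_non_bracket = False
--     code_chars = []
--     comment = ""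
--     i = 0
--     n = len(stripped)
--     while i < n:
--         ch = stripped[i]
--         if escape:
--             escape = False
--         elif ch == '\\' and in_string:
--             escape = True
--         elif ch == '"':
--             in_string = not in_string
--             found_non_bracket = True
--         elif not in_string:
--             if ch == '/' and i + 1 < n and stripped[i + 1] == '/':
--                 comment = stripped[i:]
--                 break
--             if ch in '{[':
--                 opens += 1
--                 found_non_bracket = True
--             elif ch in '}]':
--                 closes += 1
--                 if not found_non_bracket:
--                     leading_closes += 1
--             elif not ch.isspace():
--                 found_non_bracket = True
--         code_chars.append(ch)
--         i += 1
--     return ''.join(code_chars), comment, opens, closes, leading_closes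
--
-- def _format_with_comments(text: str) -> str:
--     result = []
--     pending_blanks = 0
--     indent_level = 0
--     for line in text.split('\n'):
--         stripped = line.strip()
--         if not stripped:
--             pending_blanks += 1
--             continue
--         code, comment, opens, closes, leading_closes = _scan_line(stripped)
--         code = code.rstrip()
--         prefix = _INDENT * max(0, indent_level - leading_closes)
--         if comment and code:
--             entry = prefix + code + "  " + comment
--         else:
--             entry = prefix + (code if code else comment)
--         result.extend([""] * pending_blanks)
--         pending_blanks = 0
--         result.append(entry)
--         indent_level = max(0, indent_level + opens - closes)
--     return '\n'.join(result) + '\n'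
-- ===== Notes on version B (the rewrite author's own statement) =====
-- stated objective: simpler
-- what changed: The two separate per-line state-machine scans (comment split, then bracket count on the rstripped code) are fused into one single-pass scanner that accumulates code chars, counts opens/closes/leading-closes and stops at an unescaped // outside strings, and the outer loop's append-blanks-then-pop-trailing-blanks bookkeeping is replaced by a lazy pending-blank counter flushed before each non-blank entry.
import Mathlib
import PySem

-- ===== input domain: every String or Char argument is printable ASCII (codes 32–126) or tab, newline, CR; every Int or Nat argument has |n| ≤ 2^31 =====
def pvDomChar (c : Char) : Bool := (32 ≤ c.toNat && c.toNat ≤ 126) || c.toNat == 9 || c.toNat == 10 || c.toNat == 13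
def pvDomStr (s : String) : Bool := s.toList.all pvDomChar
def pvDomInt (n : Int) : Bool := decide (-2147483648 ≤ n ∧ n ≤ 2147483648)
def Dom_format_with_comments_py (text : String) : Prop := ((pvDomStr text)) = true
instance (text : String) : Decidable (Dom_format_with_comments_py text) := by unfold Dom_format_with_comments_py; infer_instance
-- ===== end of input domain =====

-- B fuses A's two per-line scans (comment split, then bracket count) into one single-pass
-- state machine and replaces the append-then-pop-trailing-blanks outer loop by a lazy
-- pending-blank counter; objective: simpler (one pass per line, no trailing pop).

-- ===== PORT A =====

-- "    " * n  (n already ≥ 0 at every call site via max(0, ·))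
def pvIndentMul (n : Int) : List Char :=
  List.flatten (List.replicate n.toNat [' ', ' ', ' ', ' '])

-- _split_code_comment's loop: rest = line.drop i; `i + 1 < len(line) and line[i+1] == '/'`
-- is exactly `rs.head? = some '/'` since line.drop (i+1) = rs.
def pvSplitGoA (line rest : List Char) (i : Nat) (instr esc : Bool) : List Char × List Char :=
  match rest with
  | [] => (line, [])
  | ch :: rs =>
    if esc then pvSplitGoA line rs (i+1) instr false
    else if ch = '\\' ∧ instr then pvSplitGoA line rs (i+1) instr true
    else if ch = '"' then pvSplitGoA line rs (i+1) (!instr) esc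
    else if ¬ instr ∧ ch = '/' ∧ rs.head? = some '/' then (line.take i, line.drop i)
    else pvSplitGoA line rs (i+1) instr esc

def pvSplitA (line : List Char) : List Char × List Char := pvSplitGoA line line 0 false false

-- _count_brackets's loop
def pvCountGoA (code : List Char) (instr esc : Bool) (opens closes leading : Int) (fnb : Bool) :
    Int × Int × Int :=
  match code with
  | [] => (opens, closes, leading)
  | ch :: rs =>
    if esc then pvCountGoA rs instr false opens closes leading fnb
    else if ch = '\\' ∧ instr then pvCountGoA rs instr true opens closes leading fnb
    else if ch = '"' then pvCountGoA rs (!instr) esc opens closes leading true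
    else if instr then pvCountGoA rs instr esc opens closes leading fnb
    else if ch = '{' ∨ ch = '[' then pvCountGoA rs instr esc (opens+1) closes leading true
    else if ch = '}' ∨ ch = ']' then
      pvCountGoA rs instr esc opens (closes+1) (if fnb then leading else leading+1) fnb
    else if ¬ (PySem.Chars.isspace ch) then pvCountGoA rs instr esc opens closes leading true
    else pvCountGoA rs instr esc opens closes leading fnb

def pvCountA (code : List Char) : Int × Int × Int := pvCountGoA code false false 0 0 0 false

-- the main for-loop of _format_with_comments
def pvLineGoA (lines : List (List Char)) (level : Int) (acc : List (List Char)) :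
    List (List Char) :=
  match lines with
  | [] => acc
  | line :: rest =>
    let stripped := PySem.Chars.strip line
    if stripped = [] then pvLineGoA rest level (acc ++ [[]])
    else
      let sc := pvSplitA stripped
      let code := PySem.Chars.rstrip sc.1
      let cnt := pvCountA code
      let pre := pvIndentMul (max 0 (level - cnt.2.2))
      let entry :=
        if code ≠ [] ∧ sc.2 ≠ [] then pre ++ code ++ [' ', ' '] ++ sc.2
        else if code ≠ [] then pre ++ code
        else pre ++ sc.2
      pvLineGoA rest (max 0 (level + cnt.1 - cnt.2.1)) (acc ++ [entry])

-- `while result and result[-1] == "": result.pop()`, run on the reversed list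
def pvPopRevA (res : List (List Char)) : List (List Char) :=
  match res with
  | [] => []
  | x :: xs => if x = [] then pvPopRevA xs else x :: xs

def format_with_comments_py (text : String) : String :=
  let lines := PySem.Chars.splitOn text.toList ['\n']
  let result := pvLineGoA lines 0 []
  let result := (pvPopRevA result.reverse).reverse
  String.ofList (PySem.Chars.join ['\n'] result ++ ['\n'])

-- ===== PORT B =====

-- _scan_line: ONE pass; builds code_chars, stops at an unescaped // outside strings,
-- counts opens/closes/leading_closes along the way.
def pvScanGoB (rest : List Char) (instr esc : Bool) (opens closes leading : Int) (fnb : Bool)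
    (acc : List Char) : List Char × List Char × Int × Int × Int :=
  match rest with
  | [] => (acc, [], opens, closes, leading)
  | ch :: rs =>
    if esc then pvScanGoB rs instr false opens closes leading fnb (acc ++ [ch])
    else if ch = '\\' ∧ instr then pvScanGoB rs instr true opens closes leading fnb (acc ++ [ch])
    else if ch = '"' then pvScanGoB rs (!instr) esc opens closes leading true (acc ++ [ch])
    else if ¬ instr then
      if ch = '/' ∧ rs.head? = some '/' then (acc, ch :: rs, opens, closes, leading)
      else if ch = '{' ∨ ch = '[' then
        pvScanGoB rs instr esc (opens+1) closes leading true (acc ++ [ch])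
      else if ch = '}' ∨ ch = ']' then
        pvScanGoB rs instr esc opens (closes+1) (if fnb then leading else leading+1) fnb (acc ++ [ch])
      else if ¬ (PySem.Chars.isspace ch) then
        pvScanGoB rs instr esc opens closes leading true (acc ++ [ch])
      else pvScanGoB rs instr esc opens closes leading fnb (acc ++ [ch])
    else pvScanGoB rs instr esc opens closes leading fnb (acc ++ [ch])

def pvScanB (stripped : List Char) : List Char × List Char × Int × Int × Int :=
  pvScanGoB stripped false false 0 0 0 false []

-- B's main loop: blank lines are only counted; pending blanks are flushed before the next entry
def pvLineGoB (lines : List (List Char)) (pending : Nat) (level : Int) (acc : List (List Char)) :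
    List (List Char) :=
  match lines with
  | [] => acc
  | line :: rest =>
    let stripped := PySem.Chars.strip line
    if stripped = [] then pvLineGoB rest (pending + 1) level acc
    else
      let sc := pvScanB stripped
      let code := PySem.Chars.rstrip sc.1
      let pre := pvIndentMul (max 0 (level - sc.2.2.2.2))
      let entry :=
        if sc.2.1 ≠ [] ∧ code ≠ [] then pre ++ code ++ [' ', ' '] ++ sc.2.1
        else pre ++ (if code ≠ [] then code else sc.2.1)
      pvLineGoB rest 0 (max 0 (level + sc.2.2.1 - sc.2.2.2.1))
        (acc ++ List.replicate pending [] ++ [entry])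

def format_with_comments_py_alt (text : String) : String :=
  let lines := PySem.Chars.splitOn text.toList ['\n']
  let result := pvLineGoB lines 0 0 []
  String.ofList (PySem.Chars.join ['\n'] result ++ ['\n'])

-- ===== PRECONDITION & SPEC =====
def Spec_format_with_comments_py (text : String) (out : String) : Prop := out = format_with_comments_py_alt text
instance (text : String) (out : String) : Decidable (Spec_format_with_comments_py text out) := by unfold Spec_format_with_comments_py; infer_instance

-- ===== CLAIM (what is proved, stated in full; the proofs are below) =====
def Claim_equal_format_with_comments_py : Prop := ∀ (text : String), Dom_format_with_comments_py text → Spec_format_with_comments_py text (format_with_comments_py text)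

-- ===== LEMMAS AND PROOFS =====

-- relative (index-free) form of A's split, used only by the proofs
def pvSplitRel : List Char → Bool → Bool → List Char × List Char
  | [], _, _ => ([], [])
  | ch :: rs, instr, esc =>
    if esc then
      let p := pvSplitRel rs instr false; (ch :: p.1, p.2)
    else if ch = '\\' ∧ instr then
      let p := pvSplitRel rs instr true; (ch :: p.1, p.2)
    else if ch = '"' then
      let p := pvSplitRel rs (!instr) esc; (ch :: p.1, p.2)
    else if ¬ instr ∧ ch = '/' ∧ rs.head? = some '/' then ([], ch :: rs)
    else
      let p := pvSplitRel rs instr esc; (ch :: p.1, p.2)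

theorem pvSplitGoA_eq_rel : ∀ (rest line : List Char) (i : Nat) (instr esc : Bool),
    line.drop i = rest →
    pvSplitGoA line rest i instr esc =
      (line.take i ++ (pvSplitRel rest instr esc).1, (pvSplitRel rest instr esc).2) := by
  intro rest
  induction rest with
  | nil =>
    intro ln i instr esc h
    simp [pvSplitGoA, pvSplitRel, List.take_of_length_le (List.drop_eq_nil_iff.mp h)]
  | cons ch rs ih =>
    intro ln i instr esc h
    have hget : ln[i]? = some ch := by rw [← List.head?_drop, h]; rfl
    have h1 : ln.drop (i+1) = rs := by rw [← List.tail_drop, h]; rfl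
    have h2 : ln.take (i+1) = ln.take i ++ [ch] := by
      rw [List.take_add_one, hget]; rfl
    simp only [pvSplitGoA, pvSplitRel]
    split_ifs with h3 h4 h5 h6
    · rw [ih ln (i+1) instr false h1, h2]; simp
    · rw [ih ln (i+1) instr true h1, h2]; simp
    · rw [ih ln (i+1) (!instr) esc h1, h2]; simp
    · simp [h]
    · rw [ih ln (i+1) instr esc h1, h2]; simp

theorem pvScanGoB_eq : ∀ (rest : List Char) (instr esc : Bool) (o c l : Int) (f : Bool)
    (acc : List Char),
    pvScanGoB rest instr esc o c l f acc =
      (acc ++ (pvSplitRel rest instr esc).1, (pvSplitRel rest instr esc).2,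
       pvCountGoA (pvSplitRel rest instr esc).1 instr esc o c l f) := by
  intro rest
  induction rest with
  | nil => intro instr esc o c l f acc; simp [pvScanGoB, pvSplitRel, pvCountGoA]
  | cons ch rs ih =>
    intro instr esc o c l f acc
    by_cases h1 : esc = true
    · simp [pvScanGoB, pvSplitRel, pvCountGoA, h1, ih]
    · by_cases h2 : ch = '\\' ∧ instr = true
      · simp [pvScanGoB, pvSplitRel, pvCountGoA, h1, h2, ih]
      · by_cases h3 : ch = '"'
        · simp [pvScanGoB, pvSplitRel, pvCountGoA, h1, h3, ih]
        · by_cases h4 : instr = true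
          · have hb : ch ≠ '\\' := fun hh => h2 ⟨hh, h4⟩
            simp [pvScanGoB, pvSplitRel, pvCountGoA, h1, hb, h3, h4, ih]
          · by_cases h5 : ch = '/' ∧ rs.head? = some '/'
            · simp [pvScanGoB, pvSplitRel, pvCountGoA, h1, h4, h5]
            · by_cases h6 : ch = '{' ∨ ch = '['
              · simp [pvScanGoB, pvSplitRel, pvCountGoA, h1, h3, h4, h5, h6, ih]
              · by_cases h7 : ch = '}' ∨ ch = ']'
                · simp [pvScanGoB, pvSplitRel, pvCountGoA, h1, h3, h4, h5, h6, h7, ih]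
                · by_cases h8 : PySem.Chars.isspace ch = true
                  · simp [pvScanGoB, pvSplitRel, pvCountGoA, h1, h3, h4, h5, h6, h7, h8, ih]
                  · simp [pvScanGoB, pvSplitRel, pvCountGoA, h1, h3, h4, h5, h6, h7, h8, ih]

theorem pvCountGoA_ws : ∀ (ws : List Char) (instr esc : Bool) (o c l : Int) (f : Bool),
    (∀ ch ∈ ws, PySem.Chars.isspace ch = true) →
    pvCountGoA ws instr esc o c l f = (o, c, l) := by
  intro ws
  induction ws with
  | nil => intro instr esc o c l f _; simp [pvCountGoA]
  | cons ch rs ih =>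
    intro instr esc o c l f hws
    have hch : PySem.Chars.isspace ch = true := hws ch (by simp)
    have hrs : ∀ x ∈ rs, PySem.Chars.isspace x = true := fun x hx => hws x (by simp [hx])
    have hb : ch ≠ '\\' := by rintro rfl; exact absurd hch (by decide)
    have hq : ch ≠ '"' := by rintro rfl; exact absurd hch (by decide)
    have hbr : ¬ (ch = '{' ∨ ch = '[') := by rintro (rfl | rfl) <;> exact absurd hch (by decide)
    have hbr2 : ¬ (ch = '}' ∨ ch = ']') := by rintro (rfl | rfl) <;> exact absurd hch (by decide)
    by_cases h1 : esc = true
    · simp only [pvCountGoA, if_pos h1]; exact ih _ _ _ _ _ _ hrs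
    · have hb2 : ¬ (ch = '\\' ∧ instr = true) := fun h => hb h.1
      simp only [pvCountGoA, if_neg h1, if_neg hb2, if_neg hq]
      by_cases h4 : instr = true
      · simp only [if_pos h4]; exact ih _ _ _ _ _ _ hrs
      · have hns : ¬ (¬ PySem.Chars.isspace ch = true) := by simp [hch]
        simp only [if_neg h4, if_neg hbr, if_neg hbr2, if_neg hns]
        exact ih _ _ _ _ _ _ hrs

theorem pvCountGoA_append_ws : ∀ (xs ws : List Char) (instr esc : Bool) (o c l : Int) (f : Bool),
    (∀ ch ∈ ws, PySem.Chars.isspace ch = true) →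
    pvCountGoA (xs ++ ws) instr esc o c l f = pvCountGoA xs instr esc o c l f := by
  intro xs
  induction xs with
  | nil =>
    intro ws instr esc o c l f hws
    simpa [pvCountGoA] using pvCountGoA_ws ws instr esc o c l f hws
  | cons ch rs ih =>
    intro ws instr esc o c l f hws
    simp only [List.cons_append, pvCountGoA]
    split_ifs <;> exact ih ws _ _ _ _ _ _ hws

theorem pvRstrip_decomp (xs : List Char) :
    xs = PySem.Chars.rstrip xs ++ (xs.reverse.takeWhile PySem.Chars.isspace).reverse ∧
    (∀ ch ∈ (xs.reverse.takeWhile PySem.Chars.isspace).reverse, PySem.Chars.isspace ch = true) := by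
  constructor
  · have h := congrArg List.reverse
      (List.takeWhile_append_dropWhile (p := PySem.Chars.isspace) (l := xs.reverse))
    simp only [List.reverse_append, List.reverse_reverse] at h
    simp only [PySem.Chars.rstrip]
    exact h.symm
  · intro ch hmem
    rw [List.mem_reverse] at hmem
    exact List.mem_takeWhile_imp hmem

theorem pvCountA_rstrip (xs : List Char) : pvCountA (PySem.Chars.rstrip xs) = pvCountA xs := by
  obtain ⟨h1, h2⟩ := pvRstrip_decomp xs
  conv_rhs => rw [h1]
  unfold pvCountA
  exact (pvCountGoA_append_ws _ _ _ _ _ _ _ _ h2).symm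

theorem pvSplitRel_concat : ∀ (cs : List Char) (instr esc : Bool),
    (pvSplitRel cs instr esc).1 ++ (pvSplitRel cs instr esc).2 = cs := by
  intro cs
  induction cs with
  | nil => intro instr esc; simp [pvSplitRel]
  | cons ch rs ih =>
    intro instr esc
    simp only [pvSplitRel]
    split_ifs <;> simp [ih]

theorem pvSplitA_concat (s : List Char) : (pvSplitA s).1 ++ (pvSplitA s).2 = s := by
  have h := pvSplitGoA_eq_rel s s 0 false false (by simp)
  unfold pvSplitA
  rw [h]
  simpa using pvSplitRel_concat s false false

theorem pvDropWhile_idem (l : List Char) :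
    List.dropWhile PySem.Chars.isspace (List.dropWhile PySem.Chars.isspace l) =
      List.dropWhile PySem.Chars.isspace l := by
  induction l with
  | nil => simp
  | cons a t ih =>
    by_cases h : PySem.Chars.isspace a = true <;> simp [h, ih]

theorem pvRstrip_strip (xs : List Char) :
    PySem.Chars.rstrip (PySem.Chars.strip xs) = PySem.Chars.strip xs := by
  simp [PySem.Chars.strip, PySem.Chars.rstrip, PySem.Chars.lstrip, pvDropWhile_idem]

theorem pvScanB_parts (s : List Char) :
    pvScanB s = ((pvSplitA s).1, (pvSplitA s).2, pvCountA (PySem.Chars.rstrip (pvSplitA s).1)) := by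
  have hA := pvSplitGoA_eq_rel s s 0 false false (by simp)
  have hB := pvScanGoB_eq s false false 0 0 0 false []
  rw [pvCountA_rstrip]
  unfold pvScanB pvSplitA pvCountA
  unfold pvSplitA at hA
  rw [hB, hA]
  simp

theorem pvLoop_eq : ∀ (lines : List (List Char)) (p : Nat) (level : Int)
    (acc : List (List Char)),
    ∃ q, pvLineGoA lines level (acc ++ List.replicate p []) =
      pvLineGoB lines p level acc ++ List.replicate q [] := by
  intro lines
  induction lines with
  | nil => intro p level acc; exact ⟨p, by simp [pvLineGoA, pvLineGoB]⟩
  | cons line rest ih =>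
    intro p level acc
    by_cases hs : PySem.Chars.strip line = []
    · obtain ⟨q, hq⟩ := ih (p+1) level acc
      refine ⟨q, ?_⟩
      have harr : (acc ++ List.replicate p ([] : List Char)) ++ [[]] =
          acc ++ List.replicate (p+1) [] := by
        simp [List.replicate_succ', List.append_assoc]
      simp only [pvLineGoA, pvLineGoB, hs, if_pos, harr]
      exact hq
    · have hparts := pvScanB_parts (PySem.Chars.strip line)
      simp only [pvLineGoA, pvLineGoB, if_neg hs, hparts]
      set sc := pvSplitA (PySem.Chars.strip line) with hsc
      set code := PySem.Chars.rstrip sc.1 with hcode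
      set cnt := pvCountA code with hcnt
      have hent :
          (if code ≠ [] ∧ sc.2 ≠ [] then
              pvIndentMul (max 0 (level - cnt.2.2)) ++ code ++ [' ', ' '] ++ sc.2
            else if code ≠ [] then pvIndentMul (max 0 (level - cnt.2.2)) ++ code
            else pvIndentMul (max 0 (level - cnt.2.2)) ++ sc.2) =
          (if sc.2 ≠ [] ∧ code ≠ [] then
              pvIndentMul (max 0 (level - cnt.2.2)) ++ code ++ [' ', ' '] ++ sc.2
            else pvIndentMul (max 0 (level - cnt.2.2)) ++ (if code ≠ [] then code else sc.2)) := by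
        by_cases h1 : code = [] <;> by_cases h2 : sc.2 = [] <;> simp [h1, h2]
      rw [hent]
      obtain ⟨q, hq⟩ := ih 0 (max 0 (level + cnt.1 - cnt.2.1))
        (acc ++ List.replicate p [] ++
          [(if sc.2 ≠ [] ∧ code ≠ [] then
              pvIndentMul (max 0 (level - cnt.2.2)) ++ code ++ [' ', ' '] ++ sc.2
            else pvIndentMul (max 0 (level - cnt.2.2)) ++ (if code ≠ [] then code else sc.2))])
      refine ⟨q, ?_⟩
      simpa [List.append_assoc] using hq

theorem pvLineGoB_last : ∀ (lines : List (List Char)) (p : Nat) (level : Int)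
    (acc : List (List Char)),
    (acc = [] ∨ ∃ x, acc.getLast? = some x ∧ x ≠ ([] : List Char)) →
    (pvLineGoB lines p level acc = [] ∨
      ∃ x, (pvLineGoB lines p level acc).getLast? = some x ∧ x ≠ ([] : List Char)) := by
  intro lines
  induction lines with
  | nil => intro p level acc h; simpa [pvLineGoB] using h
  | cons line rest ih =>
    intro p level acc h
    by_cases hs : PySem.Chars.strip line = []
    · simp only [pvLineGoB, hs, if_pos]
      exact ih _ _ _ h
    · have hparts := pvScanB_parts (PySem.Chars.strip line)
      simp only [pvLineGoB, if_neg hs, hparts]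
      set sc := pvSplitA (PySem.Chars.strip line) with hsc
      set code := PySem.Chars.rstrip sc.1 with hcode
      set cnt := pvCountA code with hcnt
      apply ih
      right
      refine ⟨_, List.getLast?_concat, ?_⟩
      by_cases h1 : sc.2 ≠ [] ∧ code ≠ []
      · simp [h1]
      · rw [if_neg h1]
        by_cases h2 : code = []
        · have hcom : sc.2 ≠ [] := by
            intro hnil
            have hcat := pvSplitA_concat (PySem.Chars.strip line)
            rw [← hsc, hnil, List.append_nil] at hcat
            have hcs : code = PySem.Chars.strip line := by
              rw [hcode, hcat, pvRstrip_strip]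
            apply hs
            rw [← hcs]
            exact h2
          simp [h2, hcom]
        · simp [h2]

theorem pvPopRevA_replicate : ∀ (q : Nat) (ys : List (List Char)),
    pvPopRevA (List.replicate q [] ++ ys) = pvPopRevA ys := by
  intro q
  induction q with
  | zero => intro ys; simp
  | succ n ih => intro ys; simp [List.replicate_succ, pvPopRevA, ih]

-- ===== VERDICT (by name: the statement is the Claim_ definition above) =====
theorem format_with_comments_py_spec : Claim_equal_format_with_comments_py := by
  intro text _
  unfold Spec_format_with_comments_py format_with_comments_py format_with_comments_py_alt
  obtain ⟨q, hq⟩ := pvLoop_eq (PySem.Chars.splitOn text.toList ['\n']) 0 0 []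
  simp only [List.replicate_zero, List.append_nil] at hq
  have hlast := pvLineGoB_last (PySem.Chars.splitOn text.toList ['\n']) 0 0 [] (Or.inl rfl)
  have hpop :
      (pvPopRevA (pvLineGoA (PySem.Chars.splitOn text.toList ['\n']) 0 []).reverse).reverse =
        pvLineGoB (PySem.Chars.splitOn text.toList ['\n']) 0 0 [] := by
    rw [hq, List.reverse_append, List.reverse_replicate, pvPopRevA_replicate]
    rcases hlast with h | ⟨x, hx, hxne⟩
    · simp [h, pvPopRevA]
    · have hhead :
          (pvLineGoB (PySem.Chars.splitOn text.toList ['\n']) 0 0 []).reverse.head? = some x := by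
        rw [List.head?_reverse]; exact hx
      cases hrev : (pvLineGoB (PySem.Chars.splitOn text.toList ['\n']) 0 0 []).reverse with
      | nil => rw [hrev] at hhead; simp at hhead
      | cons y t =>
        rw [hrev] at hhead
        simp only [List.head?_cons, Option.some.injEq] at hhead
        subst hhead
        have hstep : pvPopRevA (y :: t) = y :: t := by
          show (if y = [] then pvPopRevA t else y :: t) = y :: t
          exact if_neg hxne
        rw [hstep, ← hrev, List.reverse_reverse]
  show String.ofList (PySem.Chars.join ['\n']
      ((pvPopRevA (pvLineGoA (PySem.Chars.splitOn text.toList ['\n']) 0 []).reverse).reverse) ++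
        ['\n']) =
    String.ofList (PySem.Chars.join ['\n']
      (pvLineGoB (PySem.Chars.splitOn text.toList ['\n']) 0 0 []) ++ ['\n'])
  rw [hpop]
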